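-- pv_equiv track=rewrite | github.com/yorks-dev/IITM-DS | Python_IITM_TERM2/Mock_Week_7/q2.py | n_hostile_pairs
-- ===== SOURCE A (Python) =====
-- def n_hostile_pairs(L: list) -> int:
--     """
--     Given a list of integers, find the number of
--     `hostile_pairs` in the given list.
--
--     Two positive integers are called hostile
--     if they have no common digits.
--
--     Args:
--         L: list[int] - numbers to check
--
--     Return:
--         int - number of hostile pairs
--     """
--     return len(
--         {
--             (L[i], L[j])
--             for i in range(len(L))
--             for j in range(i + 1, len(L))
--             if set(str(L[i])).intersection(str(L[j])) == set()
--         }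
--     )
-- ===== SOURCE B (Python) =====
-- def n_hostile_pairs(L: list) -> int:
--     """
--     Count hostile pairs (pairs (L[i], L[j]) with i < j whose decimal
--     representations share no character), counting each distinct pair once.
--
--     Instead of materialising the set of all O(n^2) pairs, deduplicate the
--     values, precompute one 11-bit character bitmask ('0123456789-') plus the
--     first and last occurrence position per distinct value, and count ordered
--     distinct-value pairs whose masks are disjoint and that occur in order.
--     """
--     vals = list(dict.fromkeys(L))
--     n = len(L)
--     rev = L[::-1]
--     info = []
--     for v in vals:
--         m = 0
--         for c in str(v):
--             m |= 1 << '0123456789-'.index(c)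
--         info.append((m, L.index(v), n - 1 - rev.index(v)))
--     count = 0
--     for (ma, fa, _) in info:
--         for (mb, _, lb) in info:
--             if ma & mb == 0 and fa < lb:
--                 count += 1
--     return count
-- ===== Notes on version B (the rewrite author's own statement) =====
-- stated objective: faster
-- what changed: Instead of materialising the set of all O(n^2) index pairs and intersecting two freshly built character sets for every pair, B deduplicates the values once, precomputes an 11-bit character bitmask ('0123456789-') and the first/last occurrence position of each distinct value, and counts ordered distinct-value pairs whose masks are disjoint and whose first occurrence precedes the other's last occurrence.
import Mathlib
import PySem

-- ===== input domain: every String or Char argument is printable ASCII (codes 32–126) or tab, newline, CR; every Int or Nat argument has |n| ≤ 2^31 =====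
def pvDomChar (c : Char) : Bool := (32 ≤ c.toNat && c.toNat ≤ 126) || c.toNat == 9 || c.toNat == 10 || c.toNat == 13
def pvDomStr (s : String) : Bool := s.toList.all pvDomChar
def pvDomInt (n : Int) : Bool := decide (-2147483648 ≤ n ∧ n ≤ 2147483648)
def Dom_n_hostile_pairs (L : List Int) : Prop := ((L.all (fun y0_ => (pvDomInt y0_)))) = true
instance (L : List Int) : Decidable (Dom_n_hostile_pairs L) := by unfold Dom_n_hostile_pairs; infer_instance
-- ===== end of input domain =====

-- B replaces A's set of all O(n^2) pairs by per-distinct-value digit bitmasks and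
-- first/last occurrence positions (objective: faster, constant-factor mechanism).

-- ===== PORT A =====
-- return len({ (L[i], L[j]) for i in range(len(L)) for j in range(i+1, len(L))
--              if set(str(L[i])).intersection(str(L[j])) == set() })
def n_hostile_pairs (L : List Int) : Int :=
  PySem.Set.len (PySem.Set.ofList (
    (PySem.List.pyRange 0 (PySem.List.len L) 1).flatMap (fun i =>
      (PySem.List.pyRange (i + 1) (PySem.List.len L) 1).filterMap (fun j =>
        if PySem.Set.equal
             (PySem.Set.inter
               (PySem.Set.ofList (PySem.Int.toChars (PySem.List.pyGetD L i 0)))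
               (PySem.Int.toChars (PySem.List.pyGetD L j 0)))
             PySem.Set.empty
        then some (PySem.List.pyGetD L i 0, PySem.List.pyGetD L j 0)
        else none))))

-- ===== PORT B =====
-- helper _mask(v): m = 0; for c in str(v): m |= 1 << '0123456789-'.index(c); return m
-- ('0123456789-'.index(c) on the single character c is the index of c in the char list;
--  c is always a character of str(v), hence present, so .index never raises and getD 0 is dead)
def pvMaskChars : List Char := "0123456789-".toList

def pvMask (v : Int) : Int :=
  (PySem.Int.toChars v).foldl
    (fun m c => PySem.Int.bor m ((1 : Int) <<< ((PySem.List.index? pvMaskChars c).getD 0))) 0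

-- vals = list(dict.fromkeys(L)); n = len(L); rev = L[::-1]
-- info = [(_mask(v), L.index(v), n - 1 - rev.index(v)) for v in vals]
-- (v ∈ vals means v ∈ L and v ∈ rev, so .index never raises and getD 0 is dead)
-- count = 0
-- for (ma, fa, _) in info:
--   for (mb, _, lb) in info:
--     if ma & mb == 0 and fa < lb: count += 1
-- return count
def n_hostile_pairs_alt (L : List Int) : Int :=
  let vals := PySem.List.dedup L
  let n := PySem.List.len L
  let rev := L.reverse        -- L[::-1]
  let info := vals.map (fun v =>
    (pvMask v, ((PySem.List.index? L v).getD 0 : Int),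
     n - 1 - ((PySem.List.index? rev v).getD 0 : Int)))
  info.foldl (fun cnt t =>
    info.foldl (fun cnt t' =>
      if PySem.Int.band t.1 t'.1 == 0 && decide (t.2.1 < t'.2.2) then cnt + 1 else cnt)
      cnt) 0

-- ===== PRECONDITION & SPEC =====
def Spec_n_hostile_pairs (L : List Int) (out : Int) : Prop := out = n_hostile_pairs_alt L
instance (L : List Int) (out : Int) : Decidable (Spec_n_hostile_pairs L out) := by unfold Spec_n_hostile_pairs; infer_instance

-- ===== CLAIM (what is proved, stated in full; the proofs are below) =====
def Claim_equal_n_hostile_pairs : Prop := ∀ (L : List Int), Dom_n_hostile_pairs L → Spec_n_hostile_pairs L (n_hostile_pairs L)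

-- ===== LEMMAS AND PROOFS =====

-- proof-only abbreviations ----------------------------------------------------

def pvDisj (x y : Int) : Prop := ∀ c ∈ PySem.Int.toChars x, c ∉ PySem.Int.toChars y

def pvFst (L : List Int) (x : Int) : Int := ((PySem.List.index? L x).getD 0 : Int)

def pvLst (L : List Int) (y : Int) : Int :=
  PySem.List.len L - 1 - ((PySem.List.index? L.reverse y).getD 0 : Int)

def pvPredPair (L : List Int) (q : Int × Int) : Bool :=
  (PySem.Int.band (pvMask q.1) (pvMask q.2) == 0) && decide (pvFst L q.1 < pvLst L q.2)

def pvPairsA (L : List Int) : List (Int × Int) :=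
  (PySem.List.pyRange 0 (PySem.List.len L) 1).flatMap (fun i =>
    (PySem.List.pyRange (i + 1) (PySem.List.len L) 1).filterMap (fun j =>
      if PySem.Set.equal
           (PySem.Set.inter
             (PySem.Set.ofList (PySem.Int.toChars (PySem.List.pyGetD L i 0)))
             (PySem.Int.toChars (PySem.List.pyGetD L j 0)))
           PySem.Set.empty
      then some (PySem.List.pyGetD L i 0, PySem.List.pyGetD L j 0)
      else none))

-- digit characters of str(v) all lie in '0123456789-' -------------------------

theorem pv_toDigitsCore_mem (fuel n : Nat) (ds : List Char)
    (hds : ∀ c ∈ ds, c ∈ pvMaskChars) :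
    ∀ c ∈ Nat.toDigitsCore 10 fuel n ds, c ∈ pvMaskChars := by
  induction fuel generalizing n ds with
  | zero => simpa [Nat.toDigitsCore] using hds
  | succ fuel ih =>
    intro c hc
    have hd : (n % 10).digitChar ∈ pvMaskChars := by
      have h10 : n % 10 < 10 := Nat.mod_lt _ (by norm_num)
      interval_cases h : (n % 10) <;> decide
    simp only [Nat.toDigitsCore] at hc
    split at hc
    · rcases List.mem_cons.mp hc with hc | hc
      · exact hc ▸ hd
      · exact hds _ hc
    · refine ih _ _ ?_ _ hc
      intro d hd'
      rcases List.mem_cons.mp hd' with h | h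
      · exact h ▸ hd
      · exact hds _ h

theorem pv_mem_toChars (v : Int) : ∀ c ∈ PySem.Int.toChars v, c ∈ pvMaskChars := by
  intro c hc
  unfold PySem.Int.toChars at hc
  split at hc
  · rcases List.mem_cons.mp hc with hc | hc
    · rw [hc]; decide
    · exact pv_toDigitsCore_mem _ _ _ (by simp) _ hc
  · exact pv_toDigitsCore_mem _ _ _ (by simp) _ hc

-- Nat-level mask and its bit characterisation ---------------------------------

def pvBit (c : Char) : Nat := (PySem.List.index? pvMaskChars c).getD 0

def pvMaskN (cs : List Char) : Nat := cs.foldl (fun m c => m ||| (1 <<< pvBit c)) 0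

theorem pv_shl_cast (k : Nat) : (1 : Int) <<< k = ((1 <<< k : Nat) : Int) := by
  simp [Int.shiftLeft_eq, Nat.shiftLeft_eq]

theorem pvMask_foldl_cast (cs : List Char) (m : Nat) :
    cs.foldl (fun m c => PySem.Int.bor m ((1 : Int) <<< ((PySem.List.index? pvMaskChars c).getD 0))) (m : Int)
      = ((cs.foldl (fun m c => m ||| (1 <<< pvBit c)) m : Nat) : Int) := by
  induction cs generalizing m with
  | nil => rfl
  | cons c cs ih =>
    simp only [List.foldl_cons, pvBit]
    rw [pv_shl_cast, PySem.Int.bor_natCast, ih]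
    rfl

theorem pvMask_eq_natCast (v : Int) : pvMask v = (pvMaskN (PySem.Int.toChars v) : Int) := by
  unfold pvMask pvMaskN
  exact_mod_cast pvMask_foldl_cast (PySem.Int.toChars v) 0

theorem pv_testBit_one_shl (b k : Nat) : (1 <<< b).testBit k = (b == k) := by
  simp only [Nat.shiftLeft_eq, one_mul, Nat.testBit_two_pow]
  by_cases h : b = k <;> simp [h]

theorem pvMaskN_foldl_testBit (cs : List Char) (m k : Nat) :
    (cs.foldl (fun m c => m ||| (1 <<< pvBit c)) m).testBit k
      = (m.testBit k || cs.any (fun c => pvBit c == k)) := by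
  induction cs generalizing m with
  | nil => simp
  | cons c cs ih =>
    simp only [List.foldl_cons, List.any_cons, ih, Nat.testBit_or, pv_testBit_one_shl]
    cases h : (pvBit c == k) <;> simp_all

theorem pv_bit_inj : ∀ c ∈ pvMaskChars, ∀ d ∈ pvMaskChars, pvBit c = pvBit d → c = d := by
  have h : pvMaskChars.all (fun c => pvMaskChars.all (fun d => (pvBit c != pvBit d) || (c == d))) = true := by rfl
  simp only [List.all_eq_true, Bool.or_eq_true, bne_iff_ne, beq_iff_eq] at h
  intro c hc d hd he
  rcases h c hc d hd with h' | h'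
  · exact absurd he h'
  · exact h'

theorem pvMaskN_testBit (cs : List Char) (k : Nat) :
    (pvMaskN cs).testBit k = cs.any (fun c => pvBit c == k) := by
  unfold pvMaskN
  rw [pvMaskN_foldl_testBit]
  simp

theorem pv_band_mask_eq_zero_iff (x y : Int) :
    PySem.Int.band (pvMask x) (pvMask y) = 0 ↔ pvDisj x y := by
  rw [pvMask_eq_natCast, pvMask_eq_natCast, PySem.Int.band_natCast, Nat.cast_eq_zero]
  constructor
  · intro h c hcx hcy
    have hx : (pvMaskN (PySem.Int.toChars x)).testBit (pvBit c) = true := by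
      rw [pvMaskN_testBit]; exact List.any_eq_true.mpr ⟨c, hcx, by simp⟩
    have hy : (pvMaskN (PySem.Int.toChars y)).testBit (pvBit c) = true := by
      rw [pvMaskN_testBit]; exact List.any_eq_true.mpr ⟨c, hcy, by simp⟩
    have := congrArg (Nat.testBit · (pvBit c)) h
    simp [Nat.testBit_and, hx, hy] at this
  · intro hdisj
    apply Nat.eq_of_testBit_eq
    intro k
    simp only [Nat.testBit_and, Nat.zero_testBit, Bool.and_eq_false_iff]
    by_cases hx : (pvMaskN (PySem.Int.toChars x)).testBit k
    · refine Or.inr ?_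
      rw [pvMaskN_testBit] at hx ⊢
      rw [List.any_eq_true] at hx
      obtain ⟨c, hcx, hck⟩ := hx
      rw [List.any_eq_false]
      intro d hdy
      simp only [beq_iff_eq] at hck ⊢
      intro hdk
      have hcd : c = d := pv_bit_inj c (pv_mem_toChars x c hcx) d (pv_mem_toChars y d hdy) (by omega)
      exact hdisj c hcx (hcd ▸ hdy)
    · exact Or.inl (by simpa using hx)

-- A's per-pair test is the same disjointness ----------------------------------

theorem pv_setEqual_iff (x y : Int) :
    PySem.Set.equal
      (PySem.Set.inter (PySem.Set.ofList (PySem.Int.toChars x)) (PySem.Int.toChars y))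
      PySem.Set.empty = true ↔ pvDisj x y := by
  simp only [PySem.Set.equal, PySem.Set.empty, Bool.and_eq_true, PySem.Set.issubset_iff,
    PySem.Set.inter, PySem.Set.contains, List.mem_filter, List.not_mem_nil, pvDisj]
  constructor
  · intro ⟨h, _⟩ c hcx hcy
    exact h c ⟨(PySem.Set.mem_ofList _ _).mpr hcx, by simpa using hcy⟩
  · intro h
    refine ⟨?_, by simp⟩
    intro c ⟨hc1, hc2⟩
    exact h c ((PySem.Set.mem_ofList _ _).mp hc1) (by simpa using hc2)

-- first/last occurrence characterisation of "some i < j holds x then y" ---------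

theorem pv_fst_lst_iff (L : List Int) (x y : Int) (hx : x ∈ L) (hy : y ∈ L) :
    (∃ i j : Nat, i < j ∧ j < L.length ∧ L.getD i 0 = x ∧ L.getD j 0 = y) ↔
      pvFst L x < pvLst L y := by
  obtain ⟨kx, hkx⟩ := Option.isSome_iff_exists.mp ((PySem.List.index?_isSome_iff L x).mpr hx)
  obtain ⟨ky, hky⟩ := Option.isSome_iff_exists.mp
    ((PySem.List.index?_isSome_iff L.reverse y).mpr (List.mem_reverse.mpr hy))
  obtain ⟨hkxlt, hkxeq, hkxmin⟩ := PySem.List.getElem_of_index?_eq_some hkx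
  obtain ⟨hkylt, hkyeq, hkymin⟩ := PySem.List.getElem_of_index?_eq_some hky
  have hky' : ky < L.length := by simpa using hkylt
  have hLjy : L[L.length - 1 - ky]'(by omega) = y := by
    rw [← hkyeq, List.getElem_reverse]
  have hmax : ∀ j (hj : j < L.length), L.length - 1 - ky < j → L[j]'hj ≠ y := by
    intro j hj hgt
    have h2 := hkymin (L.length - 1 - j) (by omega)
    rw [List.getElem_reverse] at h2
    simpa [show L.length - 1 - (L.length - 1 - j) = j by omega] using h2
  have hfst : pvFst L x = (kx : Int) := by unfold pvFst; rw [hkx]; rfl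
  have hlst : pvLst L y = ((L.length - 1 - ky : Nat) : Int) := by
    unfold pvLst
    rw [hky]
    simp only [Option.getD_some, PySem.List.len_eq]
    omega
  constructor
  · rintro ⟨i, j, hij, hjn, hx', hy'⟩
    have hin : i < L.length := lt_trans hij hjn
    have h1 : kx ≤ i := by
      by_contra h
      push Not at h
      exact hkxmin i h (by rw [← List.getD_eq_getElem L 0 hin]; exact hx')
    have h2 : j ≤ L.length - 1 - ky := by
      by_contra h
      push Not at h
      exact hmax j hjn (by omega) (by rw [← List.getD_eq_getElem L 0 hjn]; exact hy')
    rw [hfst, hlst]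
    omega
  · intro hlt
    rw [hfst, hlst] at hlt
    have hkj : kx < L.length - 1 - ky := by exact_mod_cast hlt
    refine ⟨kx, L.length - 1 - ky, hkj, by omega, ?_, ?_⟩
    · rw [List.getD_eq_getElem L 0 hkxlt]; exact hkxeq
    · rw [List.getD_eq_getElem L 0 (by omega)]; exact hLjy

-- membership in A's generated pair list ---------------------------------------

theorem pv_mem_pairsA (L : List Int) (p : Int × Int) :
    p ∈ pvPairsA L ↔ ∃ i j : Nat, i < j ∧ j < L.length ∧
      pvDisj (L.getD i 0) (L.getD j 0) ∧ p = (L.getD i 0, L.getD j 0) := by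
  simp only [pvPairsA, List.mem_flatMap, List.mem_filterMap, PySem.List.mem_pyRange_one,
    PySem.List.len_eq]
  constructor
  · rintro ⟨i, ⟨hi0, hiL⟩, j, ⟨hij, hjL⟩, hsome⟩
    split at hsome
    case isFalse => exact absurd hsome (by simp)
    case isTrue hcond =>
      have hj0 : (0 : Int) ≤ j := by omega
      rw [← Int.toNat_of_nonneg hi0, ← Int.toNat_of_nonneg hj0] at hcond hsome
      simp only [PySem.List.pyGetD_natCast] at hcond hsome
      refine ⟨i.toNat, j.toNat, by omega, by omega, ?_, ?_⟩
      · exact (pv_setEqual_iff _ _).mp hcond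
      · exact (Option.some_inj.mp hsome).symm
  · rintro ⟨i, j, hij, hjL, hdisj, hp⟩
    refine ⟨(i : Int), ⟨by positivity, by exact_mod_cast lt_trans hij hjL⟩,
            (j : Int), ⟨by exact_mod_cast hij, by exact_mod_cast hjL⟩, ?_⟩
    rw [if_pos]
    · simp only [PySem.List.pyGetD_natCast]
      exact congrArg some hp.symm
    · simp only [PySem.List.pyGetD_natCast]
      exact (pv_setEqual_iff _ _).mpr hdisj

-- the double counting loop of B as a countP over the product list --------------

theorem pv_countP_product {α : Type} (q : α × α → Bool) (l₁ l₂ : List α) :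
    (l₁ ×ˢ l₂).countP q = (l₁.map (fun a => l₂.countP (fun b => q (a, b)))).sum := by
  induction l₁ with
  | nil => rfl
  | cons a l ih =>
    simp [List.product_cons, List.countP_append, ih, List.countP_map, Function.comp_def]

theorem pv_double_foldl {α : Type} (p : α → α → Bool) (l : List α) :
    l.foldl (fun cnt t => l.foldl (fun cnt t' => if p t t' then cnt + 1 else cnt) cnt) 0
      = (((l ×ˢ l).countP (fun q => p q.1 q.2) : Nat) : Int) := by
  have hfun : (fun (cnt : Int) t => l.foldl (fun cnt t' => if p t t' then cnt + 1 else cnt) cnt)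
      = (fun (cnt : Int) t => cnt + ((l.countP (fun t' => p t t') : Nat) : Int)) := by
    funext c t
    exact PySem.List.foldl_count_if _ _ _
  rw [hfun, PySem.List.foldl_add, pv_countP_product]
  simp [Nat.cast_list_sum, List.map_map, Function.comp_def]

theorem pv_product_map {α β : Type} (f : α → β) (l₁ l₂ : List α) :
    (l₁.map f) ×ˢ (l₂.map f) = (l₁ ×ˢ l₂).map (Prod.map f f) := by
  induction l₁ with
  | nil => rfl
  | cons a l ih =>
    simp [List.product_cons, ih, List.map_map, Function.comp_def]

def pvInfo (L : List Int) : List (Int × Int × Int) :=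
  (PySem.List.dedup L).map (fun v => (pvMask v, pvFst L v, pvLst L v))

theorem pv_alt_eq_countP (L : List Int) :
    n_hostile_pairs_alt L
      = ((((PySem.List.dedup L) ×ˢ (PySem.List.dedup L)).countP (pvPredPair L) : Nat) : Int) := by
  have h1 : n_hostile_pairs_alt L
      = (pvInfo L).foldl (fun cnt t => (pvInfo L).foldl
          (fun cnt t' => if (PySem.Int.band t.1 t'.1 == 0) && decide (t.2.1 < t'.2.2)
                         then cnt + 1 else cnt) cnt) 0 := rfl
  rw [h1, pv_double_foldl]
  unfold pvInfo
  rw [pv_product_map, List.countP_map]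
  rfl

-- assembly --------------------------------------------------------------------

theorem pv_main (L : List Int) : n_hostile_pairs L = n_hostile_pairs_alt L := by
  have hA : n_hostile_pairs L = (((PySem.Set.ofList (pvPairsA L)).length : Nat) : Int) := rfl
  rw [hA, pv_alt_eq_countP, List.countP_eq_length_filter]
  congr 1
  have hnodupA : (PySem.Set.ofList (pvPairsA L)).Nodup := PySem.Set.nodup_ofList _
  have hnodupB : (((PySem.List.dedup L) ×ˢ (PySem.List.dedup L)).filter (pvPredPair L)).Nodup :=
    ((PySem.List.nodup_dedup L).product (PySem.List.nodup_dedup L)).filter _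
  rw [← List.toFinset_card_of_nodup hnodupA, ← List.toFinset_card_of_nodup hnodupB]
  congr 1
  apply Finset.ext
  intro p
  simp only [List.mem_toFinset]
  rw [PySem.Set.mem_ofList, pv_mem_pairsA, List.mem_filter]
  constructor
  · rintro ⟨i, j, hij, hjL, hdisj, hp⟩
    have hin : i < L.length := lt_trans hij hjL
    have hxmem : L.getD i 0 ∈ L := by
      rw [List.getD_eq_getElem L 0 hin]; exact List.getElem_mem _
    have hymem : L.getD j 0 ∈ L := by
      rw [List.getD_eq_getElem L 0 hjL]; exact List.getElem_mem _
    subst hp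
    refine ⟨List.mem_product.mpr ⟨?_, ?_⟩, ?_⟩
    · exact (PySem.List.mem_dedup L _).mpr hxmem
    · exact (PySem.List.mem_dedup L _).mpr hymem
    · simp only [pvPredPair, Bool.and_eq_true, beq_iff_eq, decide_eq_true_eq]
      exact ⟨(pv_band_mask_eq_zero_iff _ _).mpr hdisj,
             (pv_fst_lst_iff L _ _ hxmem hymem).mp ⟨i, j, hij, hjL, rfl, rfl⟩⟩
  · rintro ⟨hmem, hpred⟩
    rcases p with ⟨x, y⟩
    obtain ⟨hx', hy'⟩ := List.mem_product.mp hmem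
    have hx : x ∈ L := (PySem.List.mem_dedup L x).mp hx'
    have hy : y ∈ L := (PySem.List.mem_dedup L y).mp hy'
    simp only [pvPredPair, Bool.and_eq_true, beq_iff_eq, decide_eq_true_eq] at hpred
    obtain ⟨i, j, hij, hjL, hxi, hyj⟩ := (pv_fst_lst_iff L x y hx hy).mpr hpred.2
    refine ⟨i, j, hij, hjL, ?_, ?_⟩
    · rw [hxi, hyj]; exact (pv_band_mask_eq_zero_iff x y).mp hpred.1
    · rw [hxi, hyj]

-- ===== VERDICT (by name: the statement is the Claim_ definition above) =====
theorem n_hostile_pairs_spec : Claim_equal_n_hostile_pairs := by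
  intro L _
  unfold Spec_n_hostile_pairs
  exact pv_main L
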